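-- pv_equiv track=rewrite | github.com/nalin-pixel/backend-repo_z58htspq_h5508d | main.py | enforce_word_range
-- ===== SOURCE A (Python) =====
-- def enforce_word_range(text: str) -> str:
--     """
--     Ensure 1400-1800 words by padding with grounded reflective sentences if short,
--     and trimming extra words if long (without breaking sentences harshly).
--     """
--     target_min, target_max = 1400, 1800
--     words = text.split()
--     n = len(words)
--     if n < target_min:
--         filler = (
--             " I took my time and described what happened in a clear way. I kept the focus on"
--             " real details, steady thoughts, and simple actions. I stayed in first person and"
--             " let each moment breathe without sounding poetic or dramatic."
--         )
--         while n < target_min: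
--             words.extend(filler.split())
--             n = len(words)
--     elif n > target_max:
--         # Trim to nearest sentence end before max
--         trimmed = " ".join(words[:target_max])
--         # Try to cut back to last period within last 120 words
--         last_dot = trimmed.rfind(".")
--         if last_dot != -1 and last_dot > target_max - 200:
--             trimmed = trimmed[: last_dot + 1]
--         return trimmed
--     return " ".join(words[:target_max])
-- ===== SOURCE B (Python) =====
-- _FILLER_WORDS = (
--     " I took my time and described what happened in a clear way. I kept the focus on"
--     " real details, steady thoughts, and simple actions. I stayed in first person and"
--     " let each moment breathe without sounding poetic or dramatic."
-- ).split()
--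
--
-- def enforce_word_range(text: str) -> str:
--     words = text.split()
--     n = len(words)
--     if n > 1800:
--         trimmed = " ".join(words[:1800])
--         last_dot = trimmed.rfind(".")
--         if last_dot > 1600:
--             trimmed = trimmed[: last_dot + 1]
--         return trimmed
--     if n < 1400:
--         k = -((n - 1400) // len(_FILLER_WORDS))  # ceil((1400 - n) / f)
--         words = words + _FILLER_WORDS * k
--     return " ".join(words)
-- ===== Notes on version B (the rewrite author's own statement) =====
-- stated objective: simpler
-- what changed: The padding while-loop is replaced by a closed-form repetition count k = ceil((1400-n)/f) with the filler split once at module level and appended in a single `words + _FILLER_WORDS * k` operation, and the trim branch's two-part guard is reduced to `last_dot > 1600`.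
import Mathlib
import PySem

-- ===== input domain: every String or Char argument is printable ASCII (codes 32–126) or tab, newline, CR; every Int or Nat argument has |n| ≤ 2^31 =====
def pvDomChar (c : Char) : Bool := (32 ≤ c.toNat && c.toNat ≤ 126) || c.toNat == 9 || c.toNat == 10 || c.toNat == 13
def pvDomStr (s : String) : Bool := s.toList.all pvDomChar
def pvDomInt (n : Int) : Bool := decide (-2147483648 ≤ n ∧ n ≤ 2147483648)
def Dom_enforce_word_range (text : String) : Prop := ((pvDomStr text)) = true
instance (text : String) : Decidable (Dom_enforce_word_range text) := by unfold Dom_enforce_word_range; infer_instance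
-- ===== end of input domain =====

set_option maxRecDepth 20000


-- B replaces A's padding while-loop by a closed-form repetition count appended in one step,
-- and simplifies the trim guard; equal return value on every input (objective: simpler).

-- ===== PORT A =====
def pvFillerA : String :=
  " I took my time and described what happened in a clear way. I kept the focus on real details, steady thoughts, and simple actions. I stayed in first person and let each moment breathe without sounding poetic or dramatic."

theorem pvFillerA_split_len : (PySem.Str.split₀ pvFillerA).length = 39 := by decide

-- the `while n < target_min: words.extend(filler.split()); n = len(words)` loop
def pvPadLoop (words : List String) : List String :=
  if words.length < 1400 then pvPadLoop (words ++ PySem.Str.split₀ pvFillerA)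
  else words
termination_by 1400 - words.length
decreasing_by
  have h : (PySem.Str.split₀ pvFillerA).length = 39 := pvFillerA_split_len
  simp only [List.length_append, h]
  omega

def enforce_word_range (text : String) : String :=
  let words := PySem.Str.split₀ text
  let n : Int := words.length
  if n < 1400 then
    PySem.Str.join " " (PySem.List.slice (pvPadLoop words) none (some 1800))
  else if n > 1800 then
    let trimmed := PySem.Str.join " " (PySem.List.slice words none (some 1800))
    let last_dot := PySem.Str.rfind trimmed "."
    if last_dot ≠ -1 ∧ last_dot > 1800 - 200 then
      PySem.Str.slice trimmed none (some (last_dot + 1))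
    else trimmed
  else
    PySem.Str.join " " (PySem.List.slice words none (some 1800))

-- ===== PORT B =====
-- module-level `_FILLER_WORDS = ("...").split()`
def pvFillerWords : List String := PySem.Str.split₀ pvFillerA

def enforce_word_range_alt (text : String) : String :=
  let words := PySem.Str.split₀ text
  let n : Int := words.length
  if n > 1800 then
    let trimmed := PySem.Str.join " " (PySem.List.slice words none (some 1800))
    let last_dot := PySem.Str.rfind trimmed "."
    if last_dot > 1600 then PySem.Str.slice trimmed none (some (last_dot + 1))
    else trimmed
  else
    let words :=
      if n < 1400 then
        let k : Int := -(PySem.Int.floordiv (n - 1400) (pvFillerWords.length : Int))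
        words ++ PySem.List.pyRepeat pvFillerWords k
      else words
    PySem.Str.join " " words

-- ===== PRECONDITION & SPEC =====
def Spec_enforce_word_range (text : String) (out : String) : Prop := out = enforce_word_range_alt text
instance (text : String) (out : String) : Decidable (Spec_enforce_word_range text out) := by unfold Spec_enforce_word_range; infer_instance

-- ===== CLAIM (what is proved, stated in full; the proofs are below) =====
def Claim_equal_enforce_word_range : Prop := ∀ (text : String), Dom_enforce_word_range text → Spec_enforce_word_range text (enforce_word_range text)

-- ===== LEMMAS AND PROOFS =====
-- floor-division bounds, with the divisor 39 a literal so that omega can finish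
theorem pvFdiv39_bounds (a : ℤ) : a.fdiv 39 * 39 ≤ a ∧ a < (a.fdiv 39 + 1) * 39 := by
  have h1 := Int.mul_fdiv_add_fmod a 39
  have h2 : a.fmod 39 = a % 39 := by simp [Int.fmod_eq_emod]
  have h3 := Int.emod_nonneg a (by norm_num : (39:ℤ) ≠ 0)
  have h4 := Int.emod_lt_of_pos a (by norm_num : (0:ℤ) < 39)
  omega

-- the while-loop computes exactly `ws ++ filler_words * (-((ws.length - 1400) // 39))`
theorem pvPadLoop_eq (ws : List String) :
    pvPadLoop ws =
      ws ++ PySem.List.pyRepeat pvFillerWords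
        (-(PySem.Int.floordiv ((ws.length : Int) - 1400) (pvFillerWords.length : Int))) := by
  rw [show pvFillerWords.length = 39 from pvFillerA_split_len]
  by_cases h : ws.length < 1400
  · rw [pvPadLoop, if_pos h, pvPadLoop_eq (ws ++ PySem.Str.split₀ pvFillerA), show pvFillerWords.length = 39 from pvFillerA_split_len]
    rw [List.append_assoc]
    congr 1
    have hlen : ((ws ++ PySem.Str.split₀ pvFillerA).length : Int)
        = (ws.length : Int) + 39 := by
      simp [List.length_append, pvFillerA_split_len]
    rw [hlen]
    simp only [PySem.Int.floordiv, Nat.cast_ofNat]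
    set m : Int := (ws.length : Int) - 1400 with hm
    have harg : (ws.length : Int) + 39 - 1400 = m + 39 := by omega
    rw [harg]
    obtain ⟨hb1, hb2⟩ := pvFdiv39_bounds m
    obtain ⟨hc1, hc2⟩ := pvFdiv39_bounds (m + 39)
    have hmneg : m < 0 := by omega
    have hq' : (m + 39).fdiv 39 = m.fdiv 39 + 1 := by omega
    have hqneg : m.fdiv 39 ≤ -1 := by nlinarith [hb1]
    rw [hq']
    have htn : (-(m.fdiv 39)).toNat = (-(m.fdiv 39 + 1)).toNat + 1 := by omega
    show PySem.Str.split₀ pvFillerA ++ PySem.List.pyRepeat pvFillerWords (-(m.fdiv 39 + 1))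
        = PySem.List.pyRepeat pvFillerWords (-(m.fdiv 39))
    simp only [PySem.List.pyRepeat, htn, List.replicate_succ, List.flatten_cons, pvFillerWords]
  · rw [pvPadLoop, if_neg h]
    have h' : (1400 : Int) ≤ (ws.length : Int) := by exact_mod_cast Nat.not_lt.mp h
    simp only [PySem.Int.floordiv, Nat.cast_ofNat]
    obtain ⟨hb1, hb2⟩ := pvFdiv39_bounds ((ws.length : Int) - 1400)
    have hq : 0 ≤ ((ws.length : Int) - 1400).fdiv 39 := by nlinarith [hb2]
    have : (-(((ws.length : Int) - 1400).fdiv 39)).toNat = 0 := by omega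
    simp [PySem.List.pyRepeat, this]
termination_by 1400 - ws.length
decreasing_by
  have h : (PySem.Str.split₀ pvFillerA).length = 39 := pvFillerA_split_len
  simp only [List.length_append, h]
  omega

-- after padding, the list has fewer than 1800 words, so `words[:1800]` is all of it
theorem pvPadLoop_len_le (ws : List String) (h : ws.length < 1439) :
    (pvPadLoop ws).length ≤ 1800 := by
  induction ws using pvPadLoop.induct with
  | case1 ws' h' ih =>
    rw [pvPadLoop, if_pos h']
    apply ih
    simp only [List.length_append, pvFillerA_split_len]
    omega
  | case2 ws' h' =>
    rw [pvPadLoop, if_neg h']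
    omega

theorem slice_take_1800 (xs : List String) :
    PySem.List.slice xs none (some (1800 : Int)) = xs.take 1800 := by
  have := PySem.List.slice_to_natCast xs 1800
  simpa using this

-- ===== VERDICT (by name: the statement is the Claim_ definition above) =====
theorem enforce_word_range_spec : Claim_equal_enforce_word_range := by
  intro text _
  show enforce_word_range text = enforce_word_range_alt text
  unfold enforce_word_range enforce_word_range_alt
  simp only
  set ws := PySem.Str.split₀ text with hws
  by_cases h1 : (ws.length : Int) < 1400
  · have h2 : ¬ (ws.length : Int) > 1800 := by omega
    rw [if_pos h1, if_neg h2, if_pos h1]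
    rw [pvPadLoop_eq ws, slice_take_1800]
    have hlt : ws.length < 1439 := by
      have : ws.length < 1400 := by exact_mod_cast h1
      omega
    have := pvPadLoop_len_le ws hlt
    rw [pvPadLoop_eq ws] at this
    rw [List.take_of_length_le this]
  · rw [if_neg h1]
    by_cases h2 : (ws.length : Int) > 1800
    · rw [if_pos h2, if_pos h2]
      set t := PySem.Str.join " " (PySem.List.slice ws none (some 1800)) with ht
      set d := PySem.Str.rfind t "." with hd
      by_cases h3 : d > 1600
      · rw [if_pos h3, if_pos (by exact ⟨by omega, by omega⟩)]
      · rw [if_neg h3, if_neg (by rintro ⟨-, hgt⟩; omega)]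
    · rw [if_neg h2, if_neg h2, if_neg h1, slice_take_1800]
      have hle : ws.length ≤ 1800 := by omega
      rw [List.take_of_length_le hle]
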